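-- pv_equiv track=rewrite | github.com/Don-Chad/WINC | for/main.py | shortlist
-- ===== SOURCE A (Python) =====
-- def shortlist(countries):
--     shortest = "aadsdaveryaverylongvalue"
--
--     short_list = ''
--     for value in countries:
--         if len(value) < len(shortest):
--             shortest = value
--             short_list = value
--         if len(value) == len(shortest):
--             short_list = shortest + " " + value
--     return short_list
-- ===== SOURCE B (Python) =====
-- def shortlist(countries):
--     shortest = "aadsdaveryaverylongvalue"
--     for value in countries:
--         if len(value) < len(shortest):
--             shortest = value
--     result = ''
--     for value in countries:
--         if len(value) == len(shortest):
--             result = shortest + " " + value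
--     return result
-- ===== Notes on version B (the rewrite author's own statement) =====
-- stated objective: simpler
-- what changed: Replaces the single interleaved scan carrying two coupled mutable strings with two independent linear passes: one finds the first shortest value (sentinel kept), one rebuilds the result from the true minimum length.
import Mathlib
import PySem

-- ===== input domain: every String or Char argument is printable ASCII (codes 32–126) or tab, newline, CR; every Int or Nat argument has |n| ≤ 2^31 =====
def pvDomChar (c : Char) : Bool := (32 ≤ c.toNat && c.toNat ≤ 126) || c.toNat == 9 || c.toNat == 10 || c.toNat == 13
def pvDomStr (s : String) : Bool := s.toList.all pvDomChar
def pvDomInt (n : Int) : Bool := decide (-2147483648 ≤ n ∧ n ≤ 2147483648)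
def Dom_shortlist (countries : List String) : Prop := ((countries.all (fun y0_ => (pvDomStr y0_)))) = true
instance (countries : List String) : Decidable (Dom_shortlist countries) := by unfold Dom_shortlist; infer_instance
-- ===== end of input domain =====

-- B: two independent linear passes (find first shortest, then rebuild result) instead of A's single interleaved scan with two coupled mutable strings; same O(n) cost.
-- ===== PORT A =====
def shortlist (countries : List String) : String :=
  let r := countries.foldl
    (fun st value =>
      let st := if PySem.Str.len value < PySem.Str.len st.1 then (value, value) else st
      if PySem.Str.len value = PySem.Str.len st.1 then (st.1, st.1 ++ " " ++ value) else st)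
    ("aadsdaveryaverylongvalue", "")
  r.2

-- ===== PORT B =====
def shortlist_alt (countries : List String) : String :=
  let shortest := countries.foldl
    (fun shortest value => if PySem.Str.len value < PySem.Str.len shortest then value else shortest)
    "aadsdaveryaverylongvalue"
  countries.foldl
    (fun result value => if PySem.Str.len value = PySem.Str.len shortest then shortest ++ " " ++ value else result)
    ""

-- ===== PRECONDITION & SPEC =====
def Spec_shortlist (countries : List String) (out : String) : Prop := out = shortlist_alt countries
instance (countries : List String) (out : String) : Decidable (Spec_shortlist countries out) := by unfold Spec_shortlist; infer_instance

-- ===== CLAIM (what is proved, stated in full; the proofs are below) =====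
def Claim_equal_shortlist : Prop := ∀ (countries : List String), Dom_shortlist countries → Spec_shortlist countries (shortlist countries)

-- ===== LEMMAS AND PROOFS =====

-- pvStepA: A's loop body (proof-side name; the port's lambda is definitionally this)
def pvStepA (st : String × String) (value : String) : String × String :=
  let st := if PySem.Str.len value < PySem.Str.len st.1 then (value, value) else st
  if PySem.Str.len value = PySem.Str.len st.1 then (st.1, st.1 ++ " " ++ value) else st

lemma pvStepA_eval (s sl v : String) :
    pvStepA (s, sl) v =
      if PySem.Str.len v < PySem.Str.len s then (v, v ++ " " ++ v)
      else if PySem.Str.len v = PySem.Str.len s then (s, s ++ " " ++ v) else (s, sl) := by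
  simp only [pvStepA]
  split_ifs with h1 h2 h3 <;> simp_all

-- pvMin s l abbreviates B's first pass: the running minimum-length value, first winner kept
def pvMin (s : String) (l : List String) : String :=
  l.foldl (fun shortest value => if PySem.Str.len value < PySem.Str.len shortest then value else shortest) s

lemma pvMin_cons (s v : String) (t : List String) :
    pvMin s (v :: t) = if PySem.Str.len v < PySem.Str.len s then pvMin v t else pvMin s t := by
  simp only [pvMin, List.foldl_cons]; split_ifs <;> rfl

lemma pvMin_le (s : String) (l : List String) :
    PySem.Str.len (pvMin s l) ≤ PySem.Str.len s := by
  induction l generalizing s with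
  | nil => simp [pvMin]
  | cons v t ih =>
    rw [pvMin_cons]
    split_ifs with h
    · exact le_of_lt (lt_of_le_of_lt (ih v) h)
    · exact ih s

lemma pvMin_eq_or_mem (s : String) (l : List String) :
    pvMin s l = s ∨ pvMin s l ∈ l := by
  induction l generalizing s with
  | nil => simp [pvMin]
  | cons v t ih =>
    rw [pvMin_cons]
    split_ifs with h
    · rcases ih v with h' | h'
      · right; rw [h']; exact List.mem_cons_self
      · right; exact List.mem_cons_of_mem _ h'
    · rcases ih s with h' | h'
      · left; exact h'
      · right; exact List.mem_cons_of_mem _ h'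

lemma pvMin_eq_of_filter_nil (s : String) (l : List String)
    (h : l.filter (fun v => decide (PySem.Str.len v = PySem.Str.len (pvMin s l))) = []) :
    pvMin s l = s := by
  rcases pvMin_eq_or_mem s l with h' | h'
  · exact h'
  · exfalso
    have := List.filter_eq_nil_iff.mp h (pvMin s l) h'
    simp at this

-- an Option.elim over the last element of a nonempty list ignores the default
lemma pv_elim_ne_nil {β : Type} (w : String) (ws : List String) (a b : β) (g : String → β) :
    ((w :: ws).getLast?).elim a g = ((w :: ws).getLast?).elim b g := by
  obtain ⟨x, hx⟩ := Option.isSome_iff_exists.mp (by simp : ((w :: ws).getLast?).isSome)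
  rw [hx]; rfl

-- B's second pass returns the last filtered match (or the init when none matches)
lemma foldl_last_filter (p : String → Prop) [DecidablePred p] (g : String → String)
    (l : List String) (r : String) :
    l.foldl (fun res v => if p v then g v else res) r =
      ((l.filter (fun v => decide (p v))).getLast?).elim r g := by
  induction l generalizing r with
  | nil => simp
  | cons v t ih =>
    simp only [List.foldl_cons, List.filter_cons]
    by_cases h : p v
    · rw [if_pos h, if_pos (by simpa using h), ih]
      rcases ht : t.filter (fun v => decide (p v)) with _ | ⟨w, ws⟩
      · simp
      · rw [List.getLast?_cons_cons]
        exact pv_elim_ne_nil w ws (g v) r g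
    · rw [if_neg h, if_neg (by simpa using h), ih]

-- the key invariant: A's interleaved fold equals B's two passes
lemma main_inv (l : List String) (s sl : String) :
    l.foldl pvStepA (s, sl)
    = (pvMin s l,
       ((l.filter (fun v => decide (PySem.Str.len v = PySem.Str.len (pvMin s l)))).getLast?).elim sl
         (fun w => pvMin s l ++ " " ++ w)) := by
  induction l generalizing s sl with
  | nil => simp [pvMin]
  | cons v t ih =>
    simp only [List.foldl_cons, pvStepA_eval, List.filter_cons]
    by_cases h1 : PySem.Str.len v < PySem.Str.len s
    · -- A updates shortest to v; the equality branch then fires: state (v, v ++ " " ++ v)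
      rw [if_pos h1, ih, pvMin_cons, if_pos h1]
      by_cases h2 : PySem.Str.len v = PySem.Str.len (pvMin v t)
      · rw [if_pos (by simpa using h2)]
        rcases ht : t.filter (fun w => decide (PySem.Str.len w = PySem.Str.len (pvMin v t))) with _ | ⟨w, ws⟩
        · have hv : pvMin v t = v := pvMin_eq_of_filter_nil v t ht
          simp [hv]
        · refine congrArg _ ?_
          rw [List.getLast?_cons_cons]
          exact pv_elim_ne_nil w ws (v ++ " " ++ v) sl _
      · rw [if_neg (by simpa using h2)]
        rcases ht : t.filter (fun w => decide (PySem.Str.len w = PySem.Str.len (pvMin v t))) with _ | ⟨w, ws⟩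
        · exact absurd (by rw [pvMin_eq_of_filter_nil v t ht]) h2
        · exact congrArg _ (pv_elim_ne_nil w ws (v ++ " " ++ v) sl _)
    · rw [if_neg h1, pvMin_cons, if_neg h1]
      by_cases h2 : PySem.Str.len v = PySem.Str.len s
      · -- shortest unchanged, equality branch fires: state (s, s ++ " " ++ v)
        rw [if_pos h2, ih]
        by_cases h3 : PySem.Str.len v = PySem.Str.len (pvMin s t)
        · rw [if_pos (by simpa using h3)]
          rcases ht : t.filter (fun w => decide (PySem.Str.len w = PySem.Str.len (pvMin s t))) with _ | ⟨w, ws⟩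
          · have hv : pvMin s t = s := pvMin_eq_of_filter_nil s t ht
            simp [hv]
          · refine congrArg _ ?_
            rw [List.getLast?_cons_cons]
            exact pv_elim_ne_nil w ws (s ++ " " ++ v) sl _
        · rw [if_neg (by simpa using h3)]
          rcases ht : t.filter (fun w => decide (PySem.Str.len w = PySem.Str.len (pvMin s t))) with _ | ⟨w, ws⟩
          · exact absurd (by rw [pvMin_eq_of_filter_nil s t ht, ← h2]) h3
          · exact congrArg _ (pv_elim_ne_nil w ws (s ++ " " ++ v) sl _)
      · -- both branches skipped: state (s, sl)
        rw [if_neg h2, ih]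
        have hle := pvMin_le s t
        have h3 : ¬ PySem.Str.len v = PySem.Str.len (pvMin s t) := by omega
        rw [if_neg (by simpa using h3)]

-- ===== VERDICT (by name: the statement is the Claim_ definition above) =====
theorem shortlist_spec : Claim_equal_shortlist := by
  intro countries _
  show (countries.foldl pvStepA ("aadsdaveryaverylongvalue", "")).2
      = countries.foldl
          (fun result value =>
            if PySem.Str.len value = PySem.Str.len (pvMin "aadsdaveryaverylongvalue" countries) then
              pvMin "aadsdaveryaverylongvalue" countries ++ " " ++ value
            else result) ""
  rw [main_inv,
    foldl_last_filter
      (fun v => PySem.Str.len v = PySem.Str.len (pvMin "aadsdaveryaverylongvalue" countries))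
      (fun v => pvMin "aadsdaveryaverylongvalue" countries ++ " " ++ v) countries ""]
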